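-- pv_equiv track=rewrite | github.com/vikil94/Feb14_Reinforcement | excercise.py | trains_to_freq
-- ===== SOURCE A (Python) =====
-- def trains_to_freq(trains):
--     trains_by_frequency = {}
--     for train in trains:
--         name = train['train']
--         freq = train['frequency_in_minutes']
--         if freq in trains_by_frequency:
--             trains_by_frequency[freq].append(name)
--         else:
--             trains_by_frequency[freq] = [name]
--     return trains_by_frequency
-- ===== SOURCE B (Python) =====
-- def trains_to_freq(trains):
--     # Two-pass regrouping: ordered-dedup the frequencies, then one comprehension per frequency.
--     freqs = dict.fromkeys(t['frequency_in_minutes'] for t in trains)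
--     return {f: [t['train'] for t in trains if t['frequency_in_minutes'] == f] for f in freqs}
-- ===== Notes on version B (the rewrite author's own statement) =====
-- stated objective: alternative
-- what changed: Replaces A's single scatter pass that appends each name into a growing dict with a two-pass regrouping: an ordered dedup of the frequencies followed by one filtering comprehension per distinct frequency.
import Mathlib
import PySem

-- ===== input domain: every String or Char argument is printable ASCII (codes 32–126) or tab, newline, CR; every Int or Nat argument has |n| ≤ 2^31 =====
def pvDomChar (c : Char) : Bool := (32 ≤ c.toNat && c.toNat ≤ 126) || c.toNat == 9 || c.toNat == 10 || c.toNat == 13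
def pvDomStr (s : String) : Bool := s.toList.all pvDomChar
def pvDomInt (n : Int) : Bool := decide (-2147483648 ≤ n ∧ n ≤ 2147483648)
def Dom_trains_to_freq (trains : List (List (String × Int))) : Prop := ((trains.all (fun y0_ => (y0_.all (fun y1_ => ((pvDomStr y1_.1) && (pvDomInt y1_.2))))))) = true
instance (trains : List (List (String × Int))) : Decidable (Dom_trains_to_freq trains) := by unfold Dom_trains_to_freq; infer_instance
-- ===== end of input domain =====

-- B regroups by a dedup pass over the frequencies plus one comprehension per distinct frequency,
-- instead of A's single scatter pass into a dict (objective: alternative decomposition, same results).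

-- ===== PORT A =====
-- input access: train['train'] / train['frequency_in_minutes'] (first-match dict lookup;
-- total via getD — Pre_ excludes the KeyError inputs)
def pvName (train : List (String × Int)) : Int := (PySem.Dict.mk train).getD "train" 0
def pvFreq (train : List (String × Int)) : Int := (PySem.Dict.mk train).getD "frequency_in_minutes" 0

def trains_to_freq (trains : List (List (String × Int))) : List (Int × List Int) :=
  (trains.foldl
    (fun trains_by_frequency train =>
      let name := pvName train
      let freq := pvFreq train
      if trains_by_frequency.contains freq then
        trains_by_frequency.modify freq [] (fun v => v ++ [name])
      else
        trains_by_frequency.insert freq [name])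
    PySem.Dict.empty).items

-- ===== PORT B =====
def trains_to_freq_alt (trains : List (List (String × Int))) : List (Int × List Int) :=
  let freqs := PySem.List.dedup (trains.map (fun t => pvFreq t))
  freqs.map (fun f =>
    (f, (trains.filter (fun t => pvFreq t == f)).map (fun t => pvName t)))

-- ===== PRECONDITION & SPEC =====
-- Pre_ excludes exactly the inputs where some train dict lacks the key 'train' or
-- 'frequency_in_minutes', on which the Python (A and B alike) raises KeyError.
def Pre_trains_to_freq (trains : List (List (String × Int))) : Prop :=
  ∀ train ∈ trains, (∃ p ∈ train, p.1 = "train") ∧ (∃ p ∈ train, p.1 = "frequency_in_minutes")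
instance (trains : List (List (String × Int))) : Decidable (Pre_trains_to_freq trains) := by
  unfold Pre_trains_to_freq; infer_instance
def pvWitness_trains_to_freq : (List (List (String × Int))) :=
  [[("train", 1), ("frequency_in_minutes", 5)], [("train", 2), ("frequency_in_minutes", 5)]]

def Spec_trains_to_freq (trains : List (List (String × Int))) (out : List (Int × List Int)) : Prop := out = trains_to_freq_alt trains
instance (trains : List (List (String × Int))) (out : List (Int × List Int)) : Decidable (Spec_trains_to_freq trains out) := by unfold Spec_trains_to_freq; infer_instance

-- ===== CLAIM (what is proved, stated in full; the proofs are below) =====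
def Claim_equal_trains_to_freq : Prop := ∀ (trains : List (List (String × Int))), Dom_trains_to_freq trains → Pre_trains_to_freq trains → Spec_trains_to_freq trains (trains_to_freq trains)

-- ===== LEMMAS AND PROOFS =====

-- A's loop body is exactly a Dict.modify at the train's frequency (inserting a fresh key
-- appends, just as modify with default [] does).
theorem pv_stepA_eq_modify (d : PySem.Dict Int (List Int)) (train : List (String × Int)) :
    (if d.contains (pvFreq train) then d.modify (pvFreq train) [] (fun v => v ++ [pvName train])
     else d.insert (pvFreq train) [pvName train])
    = d.modify (pvFreq train) [] (fun v => v ++ [pvName train]) := by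
  cases h : d.contains (pvFreq train) with
  | true => simp
  | false =>
    unfold PySem.Dict.modify
    rw [PySem.Dict.getD_of_not_contains d [] h]
    simp

theorem pv_foldA_eq (trains : List (List (String × Int))) (d : PySem.Dict Int (List Int)) :
    trains.foldl
      (fun trains_by_frequency train =>
        let name := pvName train
        let freq := pvFreq train
        if trains_by_frequency.contains freq then
          trains_by_frequency.modify freq [] (fun v => v ++ [name])
        else
          trains_by_frequency.insert freq [name]) d
    = trains.foldl (fun d t => d.modify (pvFreq t) [] (fun v => v ++ [pvName t])) d := by
  induction trains generalizing d with
  | nil => rfl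
  | cons t ts ih =>
    simp only [List.foldl_cons]
    rw [← ih]
    congr 1
    exact pv_stepA_eq_modify d t

-- ===== VERDICT (by name: the statement is the Claim_ definition above) =====
theorem trains_to_freq_spec : Claim_equal_trains_to_freq := by
  intro trains _ _
  unfold Spec_trains_to_freq trains_to_freq trains_to_freq_alt
  rw [pv_foldA_eq]
  set d := trains.foldl (fun d t => d.modify (pvFreq t) [] (fun v => v ++ [pvName t]))
      PySem.Dict.empty with hd
  have hnd : d.keys.Nodup := by
    apply PySem.Dict.nodup_keys_foldl_modify_key trains pvFreq [] (fun _ t => (fun v => v ++ [pvName t]))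
    simp
  have hkeys : d.keys = PySem.Set.ofList (trains.map pvFreq) := by
    rw [hd, PySem.Dict.keys_foldl_modify_key trains pvFreq [] (fun _ t => (fun v => v ++ [pvName t]))]
    simp [PySem.Set.update_nil_left]
  have hget : ∀ c : Int, d.getD c [] =
      (trains.filter (fun t => pvFreq t == c)).map (fun t => pvName t) := by
    intro c
    have hmap : d = (trains.map (fun t => (pvFreq t, pvName t))).foldl
        (fun d p => d.modify p.1 [] (fun v => v ++ [p.2])) PySem.Dict.empty := by
      rw [hd, List.foldl_map]
    rw [hmap, PySem.Dict.getD_foldl_modify_append, PySem.Dict.getD_empty, List.filter_map]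
    simp [Function.comp_def]
  rw [PySem.Dict.items_eq_map_keys d hnd [], hkeys]
  simp only [PySem.List.dedup]
  apply List.map_congr_left
  intro k _
  rw [hget k]
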